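-- pv_equiv track=rewrite | github.com/pypi-data/pypi-mirror-367 | packages/hebrewdate/hebrewdate-2.1.0.tar.gz/hebrewdate-2.1.0/hebrewdate/hebrewyear.py | year_to_str
-- ===== SOURCE A (Python) =====
-- def year_to_str(year: int) -> str:
--     """
--     Convert a numeric Hebrew year to its traditional Hebrew string representation.
--
--     **year**: ``int``
--         The numeric Hebrew year to convert (1-9999)
--     """
--     if year < 1 or year > 9999:
--         raise ValueError(f"bad year value {year}")
--     parts = []
--     thousands, year = divmod(year, 1000)
--     hundreds, year = divmod(year, 100)
--     # Special case 400
--     while hundreds >= 4: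
--         parts.append(chr(1514))  # ת
--         hundreds -= 4
--     # Hundreds
--     if hundreds:
--         parts.append(chr(1510 + hundreds))
--     # Special cases for 15 and 16
--     if year == 15:
--         parts.extend(['ט', 'ו'])
--     elif year == 16:
--         parts.extend(['ט', 'ז'])
--     else:
--         tens, year = divmod(year, 10)
--         # Tens
--         if tens:
--             tens = 1496 + tens + (tens // 2)
--             parts.append(chr(tens + 1 if tens in (1503, 1509) else tens))
--         # Units
--         if year:
--             parts.append(chr(1487 + year))
--     # Add gershayim/geresh
--     if len(parts) >= 2:
--         parts[-2] += '"'  # Gershayim before last letter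
--
--     return (f"{chr(1487 + thousands)}'" if thousands else '') + ''.join(parts)
-- ===== SOURCE B (Python) =====
-- # Greedy gematria over a value->letter table instead of digit-by-digit divmod arithmetic.
-- _VALUES = [
--     (400, '\u05ea'), (300, '\u05e9'), (200, '\u05e8'), (100, '\u05e7'),
--     (90, '\u05e6'), (80, '\u05e4'), (70, '\u05e2'), (60, '\u05e1'),
--     (50, '\u05e0'), (40, '\u05de'), (30, '\u05dc'), (20, '\u05db'), (10, '\u05d9'),
--     (9, '\u05d8'), (8, '\u05d7'), (7, '\u05d6'), (6, '\u05d5'), (5, '\u05d4'),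
--     (4, '\u05d3'), (3, '\u05d2'), (2, '\u05d1'), (1, '\u05d0'),
-- ]
-- _UNITS = ['\u05d0', '\u05d1', '\u05d2', '\u05d3', '\u05d4',
--           '\u05d5', '\u05d6', '\u05d7', '\u05d8']
--
--
-- def year_to_str(year: int) -> str:
--     """
--     Convert a numeric Hebrew year to its traditional Hebrew string representation.
--
--     **year**: ``int``
--         The numeric Hebrew year to convert (1-9999)
--     """
--     if year < 1 or year > 9999:
--         raise ValueError(f"bad year value {year}")
--     thousands, n = divmod(year, 1000)
--     # 15 and 16 are never written with yod (divine-name avoidance): peel them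
--     # off and spell them tet-vav / tet-zayin instead of letting the greedy run.
--     r = n % 100
--     if r in (15, 16):
--         n -= r
--         tail = ['\u05d8', '\u05d5' if r == 15 else '\u05d6']
--     else:
--         tail = []
--     letters = []
--     for value, letter in _VALUES:
--         while n >= value:
--             letters.append(letter)
--             n -= value
--     letters += tail
--     if len(letters) >= 2:
--         letters[-2] += '"'
--     prefix = _UNITS[thousands - 1] + "'" if thousands else ''
--     return prefix + ''.join(letters)
-- ===== Notes on version B (the rewrite author's own statement) =====
-- stated objective: alternative
-- what changed: Replaces the digit-by-digit arithmetic (chr-code formulas, the while-subtract-400 hundreds loop and the tens final-letter correction) with a single greedy pass over a value->letter gematria table, peeling the tet-vav/tet-zayin special teens off before the pass.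
import Mathlib
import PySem

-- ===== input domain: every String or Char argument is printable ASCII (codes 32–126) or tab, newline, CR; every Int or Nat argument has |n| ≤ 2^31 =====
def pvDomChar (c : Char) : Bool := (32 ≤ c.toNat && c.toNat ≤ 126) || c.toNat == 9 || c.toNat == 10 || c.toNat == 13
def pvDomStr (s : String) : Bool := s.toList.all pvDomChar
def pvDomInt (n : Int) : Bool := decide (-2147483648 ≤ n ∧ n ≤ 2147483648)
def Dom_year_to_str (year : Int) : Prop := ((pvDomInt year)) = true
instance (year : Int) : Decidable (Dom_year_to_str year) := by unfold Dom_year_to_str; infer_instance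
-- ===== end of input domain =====

-- B replaces A's digit-by-digit chr-arithmetic with one greedy pass over a value->letter
-- gematria table (alternative algorithm, same cost).


-- ===== PORT A =====
-- while hundreds >= 4: parts.append('ת'); hundreds -= 4   (fuel 3 suffices: hundreds ≤ 9)
def ytsHundLoop : Nat → Int → List String → Int × List String
  | 0, h, parts => (h, parts)
  | fuel + 1, h, parts =>
      if h ≥ 4 then ytsHundLoop fuel (h - 4) (parts ++ ["ת"]) else (h, parts)

-- the parts built for the 0..999 remainder (A's hundreds/tens/units section)
def ytsBodyA (y0 : Int) : List String :=
  let hd := PySem.Int.floordiv y0 100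
  let y := PySem.Int.mod y0 100
  let (hd, parts) := ytsHundLoop 3 hd []
  let parts := if hd ≠ 0 then parts ++ [String.mk [Char.ofNat (1510 + hd).toNat]] else parts
  if y = 15 then parts ++ ["ט", "ו"]
  else if y = 16 then parts ++ ["ט", "ז"]
  else
    let tens := PySem.Int.floordiv y 10
    let y := PySem.Int.mod y 10
    let parts :=
      if tens ≠ 0 then
        let t := 1496 + tens + PySem.Int.floordiv tens 2
        parts ++ [String.mk [Char.ofNat (if t = 1503 ∨ t = 1509 then t + 1 else t).toNat]]
      else parts
    if y ≠ 0 then parts ++ [String.mk [Char.ofNat (1487 + y).toNat]] else parts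

-- parts[-2] += '"'
def ytsGersh (parts : List String) : List String :=
  if parts.length ≥ 2 then
    parts.set (parts.length - 2) ((parts.getD (parts.length - 2) "") ++ "\"")
  else parts

def year_to_str (year : Int) : String :=
  if year < 1 ∨ year > 9999 then "" else  -- Python raises ValueError here (outside Pre_)
  let thousands := PySem.Int.floordiv year 1000
  let y := PySem.Int.mod year 1000
  let parts := ytsGersh (ytsBodyA y)
  (if thousands ≠ 0 then String.mk [Char.ofNat (1487 + thousands).toNat] ++ "'" else "")
    ++ String.join parts

-- ===== PORT B =====
def ytsValues : List (Int × String) :=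
  [(400, "ת"), (300, "ש"), (200, "ר"), (100, "ק"),
   (90, "צ"), (80, "פ"), (70, "ע"), (60, "ס"),
   (50, "נ"), (40, "מ"), (30, "ל"), (20, "כ"), (10, "י"),
   (9, "ט"), (8, "ח"), (7, "ז"), (6, "ו"), (5, "ה"),
   (4, "ד"), (3, "ג"), (2, "ב"), (1, "א")]

def ytsUnits : List String := ["א", "ב", "ג", "ד", "ה", "ו", "ז", "ח", "ט"]

-- while n >= value: letters.append(letter); n -= value   (fuel 3 suffices: at most 2 repeats)
def ytsRep : Nat → Int → String → Int → List String → Int × List String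
  | 0, _, _, n, acc => (n, acc)
  | fuel + 1, v, ch, n, acc =>
      if n ≥ v then ytsRep fuel v ch (n - v) (acc ++ [ch]) else (n, acc)

def ytsGreedy : List (Int × String) → Int → List String → List String
  | [], _, acc => acc
  | (v, ch) :: rest, n, acc =>
      let (n', acc') := ytsRep 3 v ch n acc
      ytsGreedy rest n' acc'

-- the letters built for the 0..999 remainder (B's 15/16 peel + greedy pass)
def ytsBodyB (n0 : Int) : List String :=
  let r := PySem.Int.mod n0 100
  let (n, tail) :=
    if r = 15 ∨ r = 16 then (n0 - r, ["ט", if r = 15 then "ו" else "ז"])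
    else (n0, ([] : List String))
  ytsGreedy ytsValues n [] ++ tail

-- letters[-2] += '"'
def ytsMark (letters : List String) : List String :=
  if letters.length ≥ 2 then
    letters.set (letters.length - 2) ((letters.getD (letters.length - 2) "") ++ "\"")
  else letters

def year_to_str_alt (year : Int) : String :=
  if year < 1 ∨ year > 9999 then "" else  -- raises in Python (outside Pre_)
  let thousands := PySem.Int.floordiv year 1000
  let n := PySem.Int.mod year 1000
  let letters := ytsMark (ytsBodyB n)
  (if thousands ≠ 0 then ytsUnits.getD (thousands - 1).toNat "" ++ "'" else "")
    ++ String.join letters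

-- ===== PRECONDITION & SPEC =====
-- A raises ValueError outside 1..9999; exactly those inputs are excluded.
def Pre_year_to_str (year : Int) : Prop := 1 ≤ year ∧ year ≤ 9999
instance (year : Int) : Decidable (Pre_year_to_str year) := by unfold Pre_year_to_str; infer_instance
def pvWitness_year_to_str : Int := (5785)

def Spec_year_to_str (year : Int) (out : String) : Prop := out = year_to_str_alt year
instance (year : Int) (out : String) : Decidable (Spec_year_to_str year out) := by unfold Spec_year_to_str; infer_instance

-- ===== CLAIM (what is proved, stated in full; the proofs are below) =====
def Claim_equal_year_to_str : Prop := ∀ (year : Int), Dom_year_to_str year → Pre_year_to_str year → Spec_year_to_str year (year_to_str year)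

-- ===== LEMMAS AND PROOFS =====
-- both bodies (after gershayim marking) agree on every remainder 0..999
set_option maxRecDepth 100000 in
theorem yts_body_eq : ∀ n : Nat, n < 1000 →
    ytsGersh (ytsBodyA (n : Int)) = ytsMark (ytsBodyB (n : Int)) := by
  decide

-- both thousands prefixes agree for 0..9
theorem yts_pref_eq : ∀ t : Nat, t < 10 →
    (if (t : Int) ≠ 0 then String.mk [Char.ofNat (1487 + (t : Int)).toNat] ++ "'" else "")
      = (if (t : Int) ≠ 0 then ytsUnits.getD ((t : Int) - 1).toNat "" ++ "'" else "") := by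
  decide

-- ===== VERDICT (by name: the statement is the Claim_ definition above) =====
theorem year_to_str_spec : Claim_equal_year_to_str := by
  intro year _ hpre
  obtain ⟨h1, h2⟩ := hpre
  unfold Spec_year_to_str year_to_str year_to_str_alt
  rw [if_neg (by omega), if_neg (by omega)]
  have hfd : PySem.Int.floordiv year 1000 = year / 1000 :=
    PySem.Int.floordiv_eq_ediv_of_pos (by omega)
  have hmd : PySem.Int.mod year 1000 = year % 1000 :=
    PySem.Int.mod_eq_emod_of_pos (by omega)
  have ht : 0 ≤ year / 1000 ∧ year / 1000 < 10 := by omega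
  have hr : 0 ≤ year % 1000 ∧ year % 1000 < 1000 := by omega
  have hbody : ytsGersh (ytsBodyA (PySem.Int.mod year 1000))
      = ytsMark (ytsBodyB (PySem.Int.mod year 1000)) := by
    rw [hmd]
    have := yts_body_eq (year % 1000).toNat (by omega)
    rwa [Int.toNat_of_nonneg hr.1] at this
  have hpref : (if PySem.Int.floordiv year 1000 ≠ 0 then
        String.mk [Char.ofNat (1487 + PySem.Int.floordiv year 1000).toNat] ++ "'" else "")
      = (if PySem.Int.floordiv year 1000 ≠ 0 then
        ytsUnits.getD (PySem.Int.floordiv year 1000 - 1).toNat "" ++ "'" else "") := by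
    rw [hfd]
    have := yts_pref_eq (year / 1000).toNat (by omega)
    rwa [Int.toNat_of_nonneg ht.1] at this
  simp only at hbody hpref ⊢
  rw [hbody, hpref]
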